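-- pv_equiv track=rewrite | github.com/tommy16102/2022-algorithm-study | 2023/May/week1/이정욱/4_표현 가능한 이진트리.py | solution
-- ===== SOURCE A (Python) =====
-- def to2(number):
--     return format(number, 'b')
--
-- def toTree(s,i,tree):
--     mid = int((len(s))/2)
--     tree[i] = s[mid]
--     if len(s) > 3:
--         toTree(s[:mid],i*2,tree)
--         toTree(s[mid+1:],i*2+1,tree)
--     elif len(s) == 3:
--         tree[i*2] = s[mid-1]
--         tree[i*2+1] = s[mid+1]
--
-- def getTreeSize(l):
--     size = 2
--     while 1:
--         if l > size-1:
--             size *= 2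
--         else:
--             break
--     return size-1
--
-- def checkTree(tree,i):
--     n = len(tree)
--     left = i*2
--     right = i*2+1
--     has_child = 0
--
--     if left <= n and right <= n:
--         has_child = 1
--
--     if has_child:
--         if tree[i] == '0':
--             if tree[left] == '1' or tree[right] == '1':
--                 return False
--             else:
--                 return checkTree(tree,left) and checkTree(tree,right)
--         else:
--             return checkTree(tree,left) and checkTree(tree,right)
--     else:
--         return True
--
-- def solution(numbers):
--     answer = []
--
--     for e in numbers:
--         e = to2(e)
--         size = getTreeSize(len(e))
--         e = '0' * (size-len(e)) + e
--
--         tree = [0] * (size+1)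
--         toTree(e,1,tree)
--         if checkTree(tree,1):
--             answer.append(1)
--         else: answer.append(0)
--
--     return answer
-- ===== SOURCE B (Python) =====
-- def solution(numbers):
--     def check(s):
--         if len(s) <= 1:
--             return True
--         mid = len(s) // 2
--         left, right = s[:mid], s[mid + 1:]
--         if s[mid] == '0' and (left[len(left) // 2] == '1' or right[len(right) // 2] == '1'):
--             return False
--         return check(left) and check(right)
--
--     answer = []
--     for e in numbers:
--         b = format(e, 'b')
--         size = 1
--         while size < len(b):
--             size = size * 2 + 1
--         s = '0' * (size - len(b)) + b
--         answer.append(1 if check(s) else 0)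
--     return answer
-- ===== Notes on version B (the rewrite author's own statement) =====
-- stated objective: simpler
-- what changed: Replaces the explicit heap-array tree (build via toTree index arithmetic, then checkTree index walk) by a single recursive predicate directly on the padded binary string, splitting at the middle; the tree list and both index-based helpers disappear.
import Mathlib
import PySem

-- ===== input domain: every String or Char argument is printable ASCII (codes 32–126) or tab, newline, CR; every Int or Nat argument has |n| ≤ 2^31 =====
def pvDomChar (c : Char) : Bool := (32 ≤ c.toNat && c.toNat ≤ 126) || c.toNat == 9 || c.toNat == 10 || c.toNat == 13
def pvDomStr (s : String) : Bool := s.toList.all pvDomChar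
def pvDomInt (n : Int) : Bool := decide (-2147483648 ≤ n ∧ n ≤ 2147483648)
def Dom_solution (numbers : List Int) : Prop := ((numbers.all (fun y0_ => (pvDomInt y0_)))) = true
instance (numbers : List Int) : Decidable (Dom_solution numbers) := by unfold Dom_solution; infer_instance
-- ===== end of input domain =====

-- B replaces A's explicit heap-array tree (build-then-walk with index arithmetic) by one
-- recursive predicate directly on the padded binary string; same padding, same results.

-- ===== PORT A =====

-- format(number, 'b') for a nonnegative value, built digit by digit (exact model of the builtin)
def natBin (n : Nat) : List Char :=
  if n < 2 then [if n = 1 then '1' else '0']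
  else natBin (n / 2) ++ [if n % 2 = 1 then '1' else '0']
termination_by n
decreasing_by omega

-- to2: format(number, 'b') (negative values get a leading '-')
def to2 (number : Int) : List Char :=
  if number < 0 then '-' :: natBin (-number).toNat else natBin number.toNat

-- toTree: Python mutates `tree` in place; ported functionally, returning the updated list.
-- int(len(s)/2) = len(s) // 2 exactly for the lengths that occur.  All writes are in range
-- in every call solution makes (List.set is then exact).
def toTree (s : List Char) (i : Nat) (tree : List Char) : List Char :=
  let mid := s.length / 2
  let tree1 := tree.set i (s.getD mid ' ')
  if 3 < s.length then
    let tree2 := toTree (s.take mid) (i * 2) tree1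
    toTree (s.drop (mid + 1)) (i * 2 + 1) tree2
  else if s.length = 3 then
    (tree1.set (i * 2) (s.getD (mid - 1) ' ')).set (i * 2 + 1) (s.getD (mid + 1) ' ')
  else tree1
termination_by s.length
decreasing_by all_goals simp [List.length_take, List.length_drop]; omega

-- the while-loop of getTreeSize (size starts at 2 and doubles; 0 < size justifies termination)
def gLoop (l : Nat) (size : Nat) (h : 0 < size) : Nat :=
  if l > size - 1 then gLoop l (size * 2) (by omega) else size
termination_by l + 1 - size
decreasing_by omega

def getTreeSize (l : Nat) : Nat := gLoop l 2 (by omega) - 1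

-- checkTree: all reads are in range in every call solution makes (the ' ' default is never
-- returned there); the proof argument 0 < i only justifies termination.
def checkTree (tree : List Char) (i : Nat) (hi : 0 < i) : Bool :=
  let n := tree.length
  let left := i * 2
  let right := i * 2 + 1
  if h : left ≤ n ∧ right ≤ n then
    if tree.getD i ' ' = '0' then
      if tree.getD left ' ' = '1' ∨ tree.getD right ' ' = '1' then false
      else checkTree tree left (by omega) && checkTree tree right (by omega)
    else checkTree tree left (by omega) && checkTree tree right (by omega)
  else true
termination_by tree.length + 1 - i
decreasing_by all_goals omega

def solution (numbers : List Int) : List Int :=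
  numbers.foldl
    (fun answer e =>
      let b := to2 e
      let size := getTreeSize b.length
      let s := List.replicate (size - b.length) '0' ++ b
      let tree0 := List.replicate (size + 1) ' '
      let tree := toTree s 1 tree0
      if checkTree tree 1 (by omega) then answer ++ [1] else answer ++ [0])
    []

-- ===== PORT B =====

-- check(s): one recursive predicate on the (sub)string; strings of length ≥ 2 split at the middle
def chk (s : List Char) : Bool :=
  if s.length ≤ 1 then true
  else
    let mid := s.length / 2
    let left := s.take mid
    let right := s.drop (mid + 1)
    if s.getD mid ' ' = '0' ∧
        (left.getD (left.length / 2) ' ' = '1' ∨ right.getD (right.length / 2) ' ' = '1') then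
      false
    else chk left && chk right
termination_by s.length
decreasing_by all_goals simp [List.length_take, List.length_drop]; omega

-- the while-loop of pad: size = 1, 3, 7, … until size ≥ len(b)
def padSize (l : Nat) (size : Nat) : Nat :=
  if size < l then padSize l (size * 2 + 1) else size
termination_by l - size
decreasing_by omega

def solution_alt (numbers : List Int) : List Int :=
  numbers.map (fun e =>
    let b := to2 e
    let size := padSize b.length 1
    let s := List.replicate (size - b.length) '0' ++ b
    if chk s then 1 else 0)

-- ===== PRECONDITION & SPEC =====
def Spec_solution (numbers : List Int) (out : List Int) : Prop := out = solution_alt numbers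
instance (numbers : List Int) (out : List Int) : Decidable (Spec_solution numbers out) := by unfold Spec_solution; infer_instance

-- ===== CLAIM (what is proved, stated in full; the proofs are below) =====
def Claim_equal_solution : Prop := ∀ (numbers : List Int), Dom_solution numbers → Spec_solution numbers (solution numbers)

-- ===== LEMMAS AND PROOFS =====

-- indices of the depth-< m subtree rooted at i in heap numbering
def inSubD (i m j : Nat) : Prop := ∃ a, a < m ∧ i * 2 ^ a ≤ j ∧ j < (i + 1) * 2 ^ a

theorem inSubD_self (i m : Nat) (hm : 0 < m) : inSubD i m i :=
  ⟨0, hm, by simp, by simp⟩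

theorem not_inSubD_of_lt {i m j : Nat} (h : j < i) : ¬ inSubD i m j := by
  rintro ⟨a, _, h1, _⟩
  have : i ≤ i * 2 ^ a := Nat.le_mul_of_pos_right _ (Nat.two_pow_pos a)
  omega

theorem inSubD_left {i m j : Nat} (h : inSubD (i * 2) m j) : inSubD i (m + 1) j := by
  obtain ⟨a, ha, h1, h2⟩ := h
  exact ⟨a + 1, by omega, by rw [pow_succ]; nlinarith, by rw [pow_succ]; nlinarith⟩

theorem inSubD_right {i m j : Nat} (h : inSubD (i * 2 + 1) m j) : inSubD i (m + 1) j := by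
  obtain ⟨a, ha, h1, h2⟩ := h
  exact ⟨a + 1, by omega, by rw [pow_succ]; nlinarith, by rw [pow_succ]; nlinarith⟩

theorem inSubD_disjoint {i m m' j : Nat} (hi : 0 < i)
    (hl : inSubD (i * 2) m j) (hr : inSubD (i * 2 + 1) m' j) : False := by
  obtain ⟨a, _, h1, h2⟩ := hl
  obtain ⟨b, _, h3, h4⟩ := hr
  rcases Nat.lt_or_ge b a with hab' | hab
  swap
  · have h5 : (2:Nat) ^ a ≤ 2 ^ b := Nat.pow_le_pow_right (by omega) hab
    have h6 : (i * 2 + 1) * 2 ^ a ≤ (i * 2 + 1) * 2 ^ b := Nat.mul_le_mul_left _ h5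
    omega
  · have h5 : (2:Nat) ^ b * 2 ≤ 2 ^ a := by
      calc (2:Nat) ^ b * 2 = 2 ^ (b + 1) := by rw [pow_succ]
      _ ≤ 2 ^ a := Nat.pow_le_pow_right (by omega) (by omega)
    have h6 : i * 2 * (2 ^ b * 2) ≤ j := le_trans (Nat.mul_le_mul_left _ h5) h1
    have h7 : i * 4 * 2 ^ b < (i * 2 + 1 + 1) * 2 ^ b := by
      calc i * 4 * 2 ^ b = i * 2 * (2 ^ b * 2) := by ring
      _ < (i * 2 + 1 + 1) * 2 ^ b := lt_of_le_of_lt h6 h4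
    have h8 : i * 4 < i * 2 + 1 + 1 := Nat.lt_of_mul_lt_mul_right h7
    omega

-- getD / set / take / drop bookkeeping
theorem getD_set_self {t : List Char} {i : Nat} {c d : Char} (h : i < t.length) :
    (t.set i c).getD i d = c := by
  simp [List.getD_eq_getElem?_getD, h]

theorem getD_set_ne {t : List Char} {i j : Nat} {c d : Char} (h : i ≠ j) :
    (t.set i c).getD j d = t.getD j d := by
  simp [List.getD_eq_getElem?_getD, h]

theorem getD_take {s : List Char} {n j : Nat} {d : Char} (h : j < n) :
    (s.take n).getD j d = s.getD j d := by
  simp [List.getD_eq_getElem?_getD, h]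

theorem getD_drop {s : List Char} {n j : Nat} {d : Char} :
    (s.drop n).getD j d = s.getD (n + j) d := by
  simp [List.getD_eq_getElem?_getD, List.getElem?_drop]

theorem toTree_length (s : List Char) (i : Nat) (tree : List Char) :
    (toTree s i tree).length = tree.length := by
  fun_induction toTree with
  | case1 s i tree mid tree1 h tree2 ihA ihB ihC =>
      exact ihC.trans (ihA.trans (by simp [tree1]))
  | case2 s i tree mid tree1 h1 h2 => simp [tree1]
  | case3 s i tree mid tree1 h1 h2 => simp [tree1]

-- length arithmetic for the split of a string of length 2^(m+1) - 1
theorem split_arith {m L : Nat} (hL : L = 2 ^ (m + 1) - 1) :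
    L / 2 = 2 ^ m - 1 ∧ L - (L / 2 + 1) = 2 ^ m - 1 ∧ 1 ≤ L := by
  have h1 := Nat.two_pow_pos m
  have h2 : (2:Nat) ^ (m + 1) = 2 ^ m * 2 := pow_succ 2 m
  omega

theorem two_le_of_three_lt {m L : Nat} (hL : L = 2 ^ (m + 1) - 1) (h3 : 3 < L) : 2 ≤ m := by
  by_contra h'
  have hm2 : m + 1 ≤ 2 := by omega
  have := Nat.pow_le_pow_right (show 1 ≤ 2 by omega) hm2
  have h4 : (2:Nat) ^ 2 = 4 := by norm_num
  omega

theorem one_le_of_three_le {m L : Nat} (hL : L = 2 ^ (m + 1) - 1) (h3 : 3 ≤ L) : 1 ≤ m := by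
  by_contra h'
  have hm2 : m + 1 ≤ 1 := by omega
  have := Nat.pow_le_pow_right (show 1 ≤ 2 by omega) hm2
  omega

-- frame: toTree on a string of length 2^m - 1 writes only inside the depth-< m subtree at i
theorem toTree_frame {m : Nat} (hm : 0 < m) {s : List Char} (hlen : s.length = 2 ^ m - 1)
    {i j : Nat} (hi : 0 < i) (hj : ¬ inSubD i m j) (tree : List Char) :
    (toTree s i tree).getD j ' ' = tree.getD j ' ' := by
  induction m generalizing s i tree with
  | zero => omega
  | succ m IH =>
    have hij : i ≠ j := fun h => hj (h ▸ inSubD_self i (m + 1) (by omega))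
    obtain ⟨hmid, hdrop, hL1⟩ := split_arith hlen
    rw [toTree]
    simp only []
    by_cases h3 : 3 < s.length
    · rw [if_pos h3]
      have hm2 : 2 ≤ m := two_le_of_three_lt hlen h3
      have hlenl : (s.take (s.length / 2)).length = 2 ^ m - 1 := by
        simp [List.length_take]; omega
      have hlenr : (s.drop (s.length / 2 + 1)).length = 2 ^ m - 1 := by
        simp [List.length_drop]; omega
      rw [IH (by omega) hlenr (by omega) (fun h => hj (inSubD_right h)),
          IH (by omega) hlenl (by omega) (fun h => hj (inSubD_left h)),
          getD_set_ne hij]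
    · rw [if_neg h3]
      by_cases he3 : s.length = 3
      · rw [if_pos he3]
        have hm1 : m = 1 := by
          have := one_le_of_three_le hlen (by omega)
          have := two_le_of_three_lt (m := m) hlen
          by_contra h'
          have h2m : 2 ≤ m := by omega
          have : (2:Nat) ^ 3 ≤ 2 ^ (m + 1) := Nat.pow_le_pow_right (by omega) (by omega)
          have h8 : (2:Nat) ^ 3 = 8 := by norm_num
          omega
        have hjl : i * 2 ≠ j := fun h =>
          hj ⟨1, by omega, by omega, by omega⟩
        have hjr : i * 2 + 1 ≠ j := fun h =>
          hj ⟨1, by omega, by omega, by omega⟩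
        rw [getD_set_ne hjr, getD_set_ne hjl, getD_set_ne hij]
      · rw [if_neg he3, getD_set_ne hij]

-- the subtree written by toTree represents the string: root char and, recursively, both halves
def Repr1 (t : List Char) (i : Nat) (s : List Char) : Prop :=
  t.getD i ' ' = s.getD (s.length / 2) ' ' ∧
  (if _h : 3 ≤ s.length then
    Repr1 t (i * 2) (s.take (s.length / 2)) ∧ Repr1 t (i * 2 + 1) (s.drop (s.length / 2 + 1))
  else True)
termination_by s.length
decreasing_by all_goals simp [List.length_take, List.length_drop]; omega

theorem Repr1_congr {m : Nat} (hm : 0 < m) {s : List Char} (hlen : s.length = 2 ^ m - 1)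
    {i : Nat} {t t' : List Char}
    (hag : ∀ j, inSubD i m j → t.getD j ' ' = t'.getD j ' ') :
    Repr1 t i s → Repr1 t' i s := by
  induction m generalizing s i t t' with
  | zero => omega
  | succ m IH =>
    intro hr
    obtain ⟨hmid, hdrop, hL1⟩ := split_arith hlen
    rw [Repr1] at hr ⊢
    obtain ⟨hroot, hrest⟩ := hr
    refine ⟨by rw [← hag i (inSubD_self i (m + 1) (by omega))]; exact hroot, ?_⟩
    by_cases h3 : 3 ≤ s.length
    · rw [dif_pos h3] at hrest ⊢
      have hm1 : 1 ≤ m := one_le_of_three_le hlen h3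
      have hlenl : (s.take (s.length / 2)).length = 2 ^ m - 1 := by
        simp [List.length_take]; omega
      have hlenr : (s.drop (s.length / 2 + 1)).length = 2 ^ m - 1 := by
        simp [List.length_drop]; omega
      exact ⟨IH (by omega) hlenl (fun j hj => hag j (inSubD_left hj)) hrest.1,
             IH (by omega) hlenr (fun j hj => hag j (inSubD_right hj)) hrest.2⟩
    · rw [dif_neg h3]
      trivial

theorem toTree_repr {m : Nat} (hm : 0 < m) {s : List Char} (hlen : s.length = 2 ^ m - 1)
    {i : Nat} (hi : 0 < i) {tree : List Char}
    (hfit : ∀ j, inSubD i m j → j < tree.length) :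
    Repr1 (toTree s i tree) i s := by
  induction m generalizing s i tree with
  | zero => omega
  | succ m IH =>
    obtain ⟨hmid, hdrop, hL1⟩ := split_arith hlen
    have hilen : i < tree.length := hfit i (inSubD_self i (m + 1) (by omega))
    rw [toTree]
    simp only []
    by_cases h3 : 3 < s.length
    · rw [if_pos h3]
      have hm2 : 2 ≤ m := two_le_of_three_lt hlen h3
      have hlenl : (s.take (s.length / 2)).length = 2 ^ m - 1 := by
        simp [List.length_take]; omega
      have hlenr : (s.drop (s.length / 2 + 1)).length = 2 ^ m - 1 := by
        simp [List.length_drop]; omega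
      set t1 := tree.set i (s.getD (s.length / 2) ' ') with ht1
      set t2 := toTree (s.take (s.length / 2)) (i * 2) t1 with ht2
      have ht1l : t1.length = tree.length := by simp [ht1]
      have ht2l : t2.length = t1.length := toTree_length _ _ _
      have RL : Repr1 t2 (i * 2) (s.take (s.length / 2)) :=
        IH (by omega) hlenl (by omega)
          (fun j hj => by rw [ht1l]; exact hfit j (inSubD_left hj))
      have RR : Repr1 (toTree (s.drop (s.length / 2 + 1)) (i * 2 + 1) t2) (i * 2 + 1)
          (s.drop (s.length / 2 + 1)) :=
        IH (by omega) hlenr (by omega)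
          (fun j hj => by rw [ht2l, ht1l]; exact hfit j (inSubD_right hj))
      have RL' : Repr1 (toTree (s.drop (s.length / 2 + 1)) (i * 2 + 1) t2) (i * 2)
          (s.take (s.length / 2)) := by
        refine Repr1_congr (by omega) hlenl (fun j hj => ?_) RL
        exact (toTree_frame (by omega) hlenr (by omega)
          (fun hr => inSubD_disjoint hi hj hr) t2).symm
      rw [Repr1]
      refine ⟨?_, ?_⟩
      · rw [toTree_frame (by omega) hlenr (by omega)
              (not_inSubD_of_lt (by omega)) t2,
            toTree_frame (by omega) hlenl (by omega)
              (not_inSubD_of_lt (by omega)) t1,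
            ht1, getD_set_self hilen]
      · rw [dif_pos (by omega : 3 ≤ s.length)]
        exact ⟨RL', RR⟩
    · rw [if_neg h3]
      by_cases he3 : s.length = 3
      · rw [if_pos he3]
        have hm1 : m = 1 := by
          have h1 := one_le_of_three_le hlen (by omega)
          by_contra h'
          have : (2:Nat) ^ 3 ≤ 2 ^ (m + 1) := Nat.pow_le_pow_right (by omega) (by omega)
          have h8 : (2:Nat) ^ 3 = 8 := by norm_num
          omega
        have hfl : i * 2 < tree.length := hfit (i * 2) ⟨1, by omega, by omega, by omega⟩
        have hfr : i * 2 + 1 < tree.length := hfit (i * 2 + 1) ⟨1, by omega, by omega, by omega⟩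
        rw [Repr1]
        constructor
        · rw [getD_set_ne (by omega), getD_set_ne (by omega)]
          exact getD_set_self (by simpa using hilen)
        · rw [dif_pos (by omega : 3 ≤ s.length)]
          constructor
          · rw [Repr1]
            refine ⟨?_, by rw [dif_neg (by simp [List.length_take]; omega)]; trivial⟩
            rw [getD_set_ne (by omega)]
            rw [getD_set_self (by simpa using hfl)]
            rw [getD_take (by simp [List.length_take]; omega)]
            congr 1
            simp [List.length_take]
            omega
          · rw [Repr1]
            refine ⟨?_, by rw [dif_neg (by simp [List.length_drop]; omega)]; trivial⟩
            rw [getD_set_self (by simpa using hfr)]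
            rw [getD_drop]
            congr 1
            simp [List.length_drop]
            omega
      · rw [if_neg he3]
        have hm0 : m = 0 := by
          by_contra h'
          have : (2:Nat) ^ 2 ≤ 2 ^ (m + 1) := Nat.pow_le_pow_right (by omega) (by omega)
          have h4 : (2:Nat) ^ 2 = 4 := by norm_num
          omega
        rw [Repr1]
        refine ⟨?_, by rw [dif_neg (by omega)]; trivial⟩
        exact getD_set_self hilen

theorem checkTree_eq_chk {K : Nat} {t : List Char} (htl : t.length = 2 ^ K)
    {m d i : Nat} (hKd : m + d = K) (hm : 0 < m)
    (hlo : 2 ^ d ≤ i) (hhi : i < 2 ^ (d + 1))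
    {s : List Char} (hlen : s.length = 2 ^ m - 1)
    (hr : Repr1 t i s) (hip : 0 < i) :
    checkTree t i hip = chk s := by
  induction m generalizing d i s with
  | zero => omega
  | succ m IH =>
    have e1 : (2:Nat) ^ (d + 1) = 2 ^ d * 2 := pow_succ 2 d
    have e2 : (2:Nat) ^ (d + 2) = 2 ^ d * 4 := by rw [pow_succ, pow_succ]; ring
    by_cases hm0 : m = 0
    · subst hm0
      have hs1 : s.length = 1 := by simpa using hlen
      have hK : K = d + 1 := by omega
      rw [checkTree]
      rw [dif_neg (by rw [htl, hK]; omega), chk, if_pos (by omega)]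
    · have hm1 : 1 ≤ m := by omega
      obtain ⟨hmid, hdrop, hL1⟩ := split_arith hlen
      have h3 : 3 ≤ s.length := by
        have : (2:Nat) ^ 2 ≤ 2 ^ (m + 1) := Nat.pow_le_pow_right (by omega) (by omega)
        have h4 : (2:Nat) ^ 2 = 4 := by norm_num
        omega
      have hd2K : (2:Nat) ^ (d + 2) ≤ 2 ^ K := Nat.pow_le_pow_right (by omega) (by omega)
      have hlenl : (s.take (s.length / 2)).length = 2 ^ m - 1 := by
        simp [List.length_take]; omega
      have hlenr : (s.drop (s.length / 2 + 1)).length = 2 ^ m - 1 := by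
        simp [List.length_drop]; omega
      rw [Repr1] at hr
      obtain ⟨hroot, hrest⟩ := hr
      rw [dif_pos h3] at hrest
      obtain ⟨RL, RR⟩ := hrest
      have IHL := IH (d := d + 1) (i := i * 2) (by omega) (by omega) (by omega)
        (by omega) hlenl RL (by omega)
      have IHR := IH (d := d + 1) (i := i * 2 + 1) (by omega) (by omega) (by omega)
        (by omega) hlenr RR (by omega)
      have hrootL : t.getD (i * 2) ' ' =
          (s.take (s.length / 2)).getD ((s.take (s.length / 2)).length / 2) ' ' := by
        have h := RL; rw [Repr1] at h; exact h.1
      have hrootR : t.getD (i * 2 + 1) ' ' =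
          (s.drop (s.length / 2 + 1)).getD ((s.drop (s.length / 2 + 1)).length / 2) ' ' := by
        have h := RR; rw [Repr1] at h; exact h.1
      rw [checkTree]
      rw [dif_pos (by rw [htl]; omega : i * 2 ≤ t.length ∧ i * 2 + 1 ≤ t.length)]
      rw [chk]
      rw [if_neg (by omega : ¬ s.length ≤ 1)]
      rw [hroot, hrootL, hrootR, IHL, IHR]
      by_cases h0 : s.getD (s.length / 2) ' ' = '0'
      · by_cases h1 : (s.take (s.length / 2)).getD ((s.take (s.length / 2)).length / 2) ' ' = '1' ∨
            (s.drop (s.length / 2 + 1)).getD ((s.drop (s.length / 2 + 1)).length / 2) ' ' = '1'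
        · rw [if_pos h0, if_pos h1, if_pos ⟨h0, h1⟩]
        · rw [if_pos h0, if_neg h1, if_neg (by tauto)]
      · rw [if_neg h0, if_neg (by tauto)]

theorem gLoop_eq_padSize (l : Nat) (size : Nat) (h : 0 < size) :
    gLoop l size h = padSize l (size - 1) + 1 := by
  fun_induction gLoop with
  | case1 a hb hc ih =>
    rw [ih]
    conv_rhs => rw [padSize]
    rw [if_pos (by omega : a - 1 < l)]
    congr 2
    omega
  | case2 a hb hc =>
    rw [padSize, if_neg (by omega : ¬ (a - 1 < l))]
    omega

theorem padSize_shape (l s : Nat) :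
    (∃ j, 0 < j ∧ s = 2 ^ j - 1) → ∃ k, 0 < k ∧ padSize l s = 2 ^ k - 1 ∧ l ≤ padSize l s := by
  fun_induction padSize with
  | case1 a hc ih =>
    rintro ⟨j, hj, rfl⟩
    apply ih
    have := Nat.two_pow_pos j
    exact ⟨j + 1, by omega, by rw [pow_succ]; omega⟩
  | case2 a hc =>
    rintro ⟨j, hj, rfl⟩
    exact ⟨j, hj, rfl, by omega⟩

-- one number: A's build-then-walk equals B's direct recursion on the padded string
theorem element_eq (e : Int) :
    checkTree
      (toTree (List.replicate (getTreeSize (to2 e).length - (to2 e).length) '0' ++ to2 e) 1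
        (List.replicate (getTreeSize (to2 e).length + 1) ' ')) 1 (by omega)
    = chk (List.replicate (padSize (to2 e).length 1 - (to2 e).length) '0' ++ to2 e) := by
  have hg : getTreeSize (to2 e).length = padSize (to2 e).length 1 := by
    rw [getTreeSize, gLoop_eq_padSize]
    norm_num
  obtain ⟨K, hK, hsz, hle⟩ := padSize_shape (to2 e).length 1 ⟨1, by omega, by norm_num⟩
  have hp := Nat.two_pow_pos K
  have hslen : (List.replicate (padSize (to2 e).length 1 - (to2 e).length) '0'
      ++ to2 e).length = 2 ^ K - 1 := by
    simp [List.length_replicate, List.length_append]; omega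
  have htl : (toTree (List.replicate (padSize (to2 e).length 1 - (to2 e).length) '0' ++ to2 e) 1
      (List.replicate (padSize (to2 e).length 1 + 1) ' ')).length = 2 ^ K := by
    rw [toTree_length, List.length_replicate]; omega
  have hfit : ∀ j, inSubD 1 K j →
      j < (List.replicate (padSize (to2 e).length 1 + 1) ' ').length := by
    rintro j ⟨a, ha, h1, h2⟩
    have : (2:Nat) ^ (a + 1) ≤ 2 ^ K := Nat.pow_le_pow_right (by omega) (by omega)
    have e1 : (2:Nat) ^ (a + 1) = 2 ^ a * 2 := pow_succ 2 a
    simp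
    omega
  have hrep := toTree_repr hK hslen (by omega) hfit
  rw [hg]
  exact checkTree_eq_chk (m := K) (d := 0) htl (by omega) hK (by norm_num) (by norm_num)
    hslen hrep (by omega)

theorem solution_acc (l : List Int) (acc : List Int) :
    List.foldl
      (fun answer e =>
        let b := to2 e
        let size := getTreeSize b.length
        let s := List.replicate (size - b.length) '0' ++ b
        let tree0 := List.replicate (size + 1) ' '
        let tree := toTree s 1 tree0
        if checkTree tree 1 (by omega) then answer ++ [1] else answer ++ [0])
      acc l = acc ++ solution_alt l := by
  induction l generalizing acc with
  | nil => simp [solution_alt]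
  | cons e t ih =>
    rw [List.foldl_cons, ih]
    simp only [solution_alt, List.map_cons]
    rw [element_eq e]
    by_cases hc : chk (List.replicate (padSize (to2 e).length 1 - (to2 e).length) '0' ++ to2 e)
    · simp [hc]
    · simp [hc]

-- ===== VERDICT (by name: the statement is the Claim_ definition above) =====
theorem solution_spec : Claim_equal_solution := by
  intro numbers _
  unfold Spec_solution solution
  simpa using solution_acc numbers []
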